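-- pv_equiv track=rewrite | github.com/skydancerosel/mini_gpt | detect_oscillations.py | build_switch_pairs
-- ===== SOURCE A (Python) =====
-- def build_switch_pairs(peaks, troughs):
--     """Match each peak to nearest subsequent trough for switch-pairs.
--
--     Returns list of (peak_step, trough_step) tuples.
--     """
--     pairs = []
--     for ps in peaks:
--         for ts in troughs:
--             if ts > ps:
--                 pairs.append((ps, ts))
--                 break
--     return pairs
-- ===== SOURCE B (Python) =====
-- def build_switch_pairs(peaks, troughs):
--     """Match each peak to nearest subsequent trough for switch-pairs.
--
--     Returns list of (peak_step, trough_step) tuples.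
--     """
--     # Prefix maxima of troughs: pm[i] = max(troughs[:i+1]); pm is non-decreasing.
--     pm = []
--     m = None
--     for t in troughs:
--         if m is None or m < t:
--             m = t
--         pm.append(m)
--     n = len(pm)
--     pairs = []
--     for ps in peaks:
--         # first index with pm[lo] > ps == first index with troughs[lo] > ps
--         lo, hi = 0, n
--         while lo < hi:
--             mid = (lo + hi) // 2
--             if pm[mid] <= ps:
--                 lo = mid + 1
--             else:
--                 hi = mid
--         if lo < n:
--             pairs.append((ps, troughs[lo]))
--     return pairs
-- ===== Notes on version B (the rewrite author's own statement) =====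
-- stated objective: faster
-- what changed: Replaces the per-peak linear scan of troughs with a one-time prefix-maximum array over troughs plus a binary search per peak (the first trough exceeding a peak is found at the first prefix-maximum exceeding it, which is monotone).
import Mathlib
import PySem

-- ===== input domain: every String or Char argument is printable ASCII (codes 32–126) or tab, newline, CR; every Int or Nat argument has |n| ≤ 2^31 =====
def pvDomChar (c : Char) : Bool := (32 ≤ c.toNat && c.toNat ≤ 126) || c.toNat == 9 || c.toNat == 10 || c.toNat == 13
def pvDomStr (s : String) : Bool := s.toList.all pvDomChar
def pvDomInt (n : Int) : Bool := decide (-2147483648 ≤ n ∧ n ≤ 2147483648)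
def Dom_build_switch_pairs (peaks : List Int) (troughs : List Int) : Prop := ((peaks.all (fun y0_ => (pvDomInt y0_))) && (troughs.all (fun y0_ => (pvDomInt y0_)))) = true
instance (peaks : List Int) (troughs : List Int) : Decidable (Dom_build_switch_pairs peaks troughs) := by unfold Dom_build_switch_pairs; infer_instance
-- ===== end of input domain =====

-- B replaces the per-peak linear scan of troughs with a one-time prefix-maximum list
-- plus a binary search per peak (same return value; asymptotically fewer comparisons).


-- ===== PORT A =====
-- inner 'for ts in troughs: if ts > ps: …; break' = first trough strictly above ps
def build_switch_pairs (peaks : List Int) (troughs : List Int) : List (Int × Int) :=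
  peaks.foldl (fun pairs ps =>
    match troughs.find? (fun ts => decide (ps < ts)) with
    | some ts => pairs ++ [(ps, ts)]
    | none => pairs) []

-- ===== PORT B =====
-- the prefix-maximum loop of Source B: carries m : Option Int, emits one element per trough
def pmAux (m : Option Int) (ts : List Int) : List Int :=
  match ts with
  | [] => []
  | t :: rest =>
    let m' : Int := match m with
      | none => t
      | some mv => if mv < t then t else mv
    m' :: pmAux (some m') rest

-- the 'while lo < hi' binary search of Source B (indexing: in-range whenever lo < hi ≤ length, so getD's default is never used — exact)
def bsearch (pm : List Int) (ps : Int) (lo hi : Nat) : Nat :=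
  if _h : lo < hi then
    let mid := (lo + hi) / 2
    if pm.getD mid 0 ≤ ps then bsearch pm ps (mid + 1) hi else bsearch pm ps lo mid
  else lo
termination_by hi - lo
decreasing_by all_goals omega

def build_switch_pairs_alt (peaks : List Int) (troughs : List Int) : List (Int × Int) :=
  let pm := pmAux none troughs
  let n := pm.length
  peaks.foldl (fun pairs ps =>
    let lo := bsearch pm ps 0 n
    if lo < n then pairs ++ [(ps, troughs.getD lo 0)] else pairs) []

-- ===== PRECONDITION & SPEC =====
def Spec_build_switch_pairs (peaks : List Int) (troughs : List Int) (out : List (Int × Int)) : Prop := out = build_switch_pairs_alt peaks troughs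
instance (peaks : List Int) (troughs : List Int) (out : List (Int × Int)) : Decidable (Spec_build_switch_pairs peaks troughs out) := by unfold Spec_build_switch_pairs; infer_instance

-- ===== CLAIM (what is proved, stated in full; the proofs are below) =====
def Claim_equal_build_switch_pairs : Prop := ∀ (peaks : List Int) (troughs : List Int), Dom_build_switch_pairs peaks troughs → Spec_build_switch_pairs peaks troughs (build_switch_pairs peaks troughs)

-- ===== LEMMAS AND PROOFS =====

theorem pmAux_length (ts : List Int) : ∀ m, (pmAux m ts).length = ts.length := by
  induction ts with
  | nil => intro m; rfl
  | cons t rest ih => intro m; simp [pmAux, ih]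

-- every element of pmAux (some mv) ts is ≥ mv
theorem pmAux_lb (ts : List Int) : ∀ mv y, y ∈ pmAux (some mv) ts → mv ≤ y := by
  induction ts with
  | nil => intro mv y h; simp [pmAux] at h
  | cons t rest ih =>
    intro mv y h
    simp only [pmAux, List.mem_cons] at h
    rcases h with h | h
    · subst h; split <;> omega
    · have := ih (if mv < t then t else mv) y h
      split at this <;> omega

-- the prefix-maximum list is non-decreasing
theorem pmAux_pairwise (ts : List Int) : ∀ m, (pmAux m ts).Pairwise (· ≤ ·) := by
  induction ts with
  | nil => intro m; simp [pmAux]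
  | cons t rest ih =>
    intro m
    simp only [pmAux, List.pairwise_cons]
    exact ⟨fun y hy => pmAux_lb rest _ y hy, ih _⟩

-- each trough is ≤ the prefix-maximum at its own index
theorem pmAux_ge_self (ts : List Int) : ∀ m i, i < ts.length → ts.getD i 0 ≤ (pmAux m ts).getD i 0 := by
  induction ts with
  | nil => intro m i h; simp at h
  | cons t rest ih =>
    intro m i h
    cases i with
    | zero => simp only [pmAux, List.getD_cons_zero]; split <;> [omega; (split <;> omega)]
    | succ j =>
      simp only [pmAux, List.getD_cons_succ]
      exact ih _ j (by simpa using h)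

-- if all troughs before index r are ≤ ps and the prefix max at r exceeds ps, then troughs[r] exceeds ps
theorem pmAux_first_gt (ps : Int) (ts : List Int) :
    ∀ m r, r < ts.length → (∀ mv, m = some mv → mv ≤ ps) →
    (∀ j, j < r → ts.getD j 0 ≤ ps) → ps < (pmAux m ts).getD r 0 → ps < ts.getD r 0 := by
  induction ts with
  | nil => intro m r h; simp at h
  | cons t rest ih =>
    intro m r hr hm hpre hgt
    cases r with
    | zero =>
      simp only [pmAux, List.getD_cons_zero] at hgt ⊢
      cases m with
      | none => exact hgt
      | some mv =>
        have hmv := hm mv rfl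
        by_cases hlt : mv < t
        · simpa [hlt] using hgt
        · simp [hlt] at hgt; omega
    | succ j =>
      have ht : t ≤ ps := by simpa using hpre 0 (Nat.succ_pos j)
      simp only [pmAux, List.getD_cons_succ] at hgt ⊢
      refine ih _ j (by simpa using hr) ?_ (fun k hk => by simpa using hpre (k+1) (by simpa using Nat.succ_lt_succ hk)) hgt
      intro mv hmv
      cases m with
      | none => simp at hmv; omega
      | some m0 =>
        have := hm m0 rfl
        simp at hmv
        split at hmv <;> omega

-- find? characterisations via the first index exceeding ps
theorem find?_eq_some_idx (ps : Int) (ts : List Int) :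
    ∀ r, r < ts.length → (∀ j, j < r → ts.getD j 0 ≤ ps) → ps < ts.getD r 0 →
    ts.find? (fun t => decide (ps < t)) = some (ts.getD r 0) := by
  induction ts with
  | nil => intro r h; simp at h
  | cons t rest ih =>
    intro r hr hpre hgt
    cases r with
    | zero =>
      simp only [List.getD_cons_zero] at hgt ⊢
      simp [List.find?, hgt]
    | succ j =>
      have ht : t ≤ ps := by simpa using hpre 0 (Nat.succ_pos j)
      have : ¬ ps < t := by omega
      simp only [List.getD_cons_succ] at hgt ⊢
      have hd : decide (ps < t) = false := by simpa using this
      simp only [List.find?, hd]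
      exact ih j (by simpa using hr) (fun k hk => by simpa using hpre (k+1) (by simpa using Nat.succ_lt_succ hk)) hgt

theorem find?_eq_none_all (ps : Int) (ts : List Int) :
    (∀ j, j < ts.length → ts.getD j 0 ≤ ps) → ts.find? (fun t => decide (ps < t)) = none := by
  induction ts with
  | nil => intro _; rfl
  | cons t rest ih =>
    intro h
    have ht : t ≤ ps := by simpa using h 0 (Nat.succ_pos _)
    have hd : decide (ps < t) = false := by simp; omega
    simp only [List.find?, hd]
    exact ih (fun k hk => by simpa using h (k+1) (by simpa using Nat.succ_lt_succ hk))

theorem pairwise_getD_mono (l : List Int) (hpw : l.Pairwise (· ≤ ·)) :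
    ∀ j k, j ≤ k → k < l.length → l.getD j 0 ≤ l.getD k 0 := by
  intro j k hjk hk
  rcases Nat.lt_or_ge j k with h | h
  · have := (List.pairwise_iff_getElem.mp hpw) j k (by omega) hk h
    rw [List.getD_eq_getElem l 0 (by omega), List.getD_eq_getElem l 0 hk]
    exact this
  · have : j = k := by omega
    subst this; rfl

-- binary-search invariant
theorem bsearch_spec (pm : List Int) (ps : Int) (hpw : pm.Pairwise (· ≤ ·)) :
    ∀ d lo hi, hi - lo = d → lo ≤ hi → hi ≤ pm.length →
    lo ≤ bsearch pm ps lo hi ∧ bsearch pm ps lo hi ≤ hi ∧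
    (∀ j, lo ≤ j → j < bsearch pm ps lo hi → pm.getD j 0 ≤ ps) ∧
    (∀ j, bsearch pm ps lo hi ≤ j → j < hi → ps < pm.getD j 0) := by
  intro d
  induction d using Nat.strong_induction_on with
  | _ d ih =>
    intro lo hi hd hle hlen
    rw [bsearch]
    by_cases h : lo < hi
    · simp only [h, dif_pos]
      set mid := (lo + hi) / 2 with hmid
      have hmlo : lo ≤ mid := by omega
      have hmhi : mid < hi := by omega
      by_cases hc : pm.getD mid 0 ≤ ps
      · rw [if_pos hc]
        obtain ⟨h1, h2, h3, h4⟩ := ih (hi - (mid+1)) (by omega) (mid+1) hi rfl (by omega) hlen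
        refine ⟨by omega, h2, ?_, h4⟩
        intro j hj1 hj2
        rcases Nat.lt_or_ge j (mid+1) with hj | hj
        · exact le_trans (pairwise_getD_mono pm hpw j mid (by omega) (by omega)) hc
        · exact h3 j hj hj2
      · rw [if_neg hc]
        obtain ⟨h1, h2, h3, h4⟩ := ih (mid - lo) (by omega) lo mid rfl (by omega) (by omega)
        refine ⟨h1, by omega, h3, ?_⟩
        intro j hj1 hj2
        rcases Nat.lt_or_ge j mid with hj | hj
        · exact h4 j hj1 hj
        · exact lt_of_lt_of_le (by omega) (pairwise_getD_mono pm hpw mid j hj (by omega))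
    · simp only [h, dif_neg, not_false_iff]
      exact ⟨le_refl _, by omega, fun j h1 h2 => by omega, fun j h1 h2 => by omega⟩

-- per-peak agreement of the two step computations
theorem step_agree (troughs : List Int) (ps : Int) :
    (let pm := pmAux none troughs
     let n := pm.length
     let lo := bsearch pm ps 0 n
     if lo < n then some (troughs.getD lo 0) else none)
    = troughs.find? (fun ts => decide (ps < ts)) := by
  simp only
  set pm := pmAux none troughs with hpm
  have hlen : pm.length = troughs.length := pmAux_length troughs none
  have hpw : pm.Pairwise (· ≤ ·) := pmAux_pairwise troughs none
  obtain ⟨h1, h2, h3, h4⟩ := bsearch_spec pm ps hpw (pm.length - 0) 0 pm.length rfl (by omega) (le_refl _)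
  set r := bsearch pm ps 0 pm.length with hr
  have hpre : ∀ j, j < r → troughs.getD j 0 ≤ ps := fun j hj =>
    le_trans (pmAux_ge_self troughs none j (by omega)) (h3 j (by omega) hj)
  by_cases hcase : r < pm.length
  · rw [if_pos hcase]
    have hgt : ps < troughs.getD r 0 :=
      pmAux_first_gt ps troughs none r (by omega) (by simp) hpre (h4 r (le_refl _) hcase)
    exact (find?_eq_some_idx ps troughs r (by omega) hpre hgt).symm
  · rw [if_neg hcase]
    exact (find?_eq_none_all ps troughs (fun j hj => hpre j (by omega))).symm

-- ===== VERDICT (by name: the statement is the Claim_ definition above) =====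
theorem build_switch_pairs_spec : Claim_equal_build_switch_pairs := by
  intro peaks troughs _
  unfold Spec_build_switch_pairs build_switch_pairs build_switch_pairs_alt
  simp only
  congr 1
  funext pairs ps
  have h := step_agree troughs ps
  simp only at h
  rw [← h]
  by_cases hc : bsearch (pmAux none troughs) ps 0 (pmAux none troughs).length < (pmAux none troughs).length
  · simp [hc]
  · simp [hc]
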